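-- pv_equiv track=rewrite | github.com/nobe0716/problem_solving | codeforces/contests/1153/C. Serval and Parenthesis Sequence.py | solve
-- ===== SOURCE A (Python) =====
-- def solve(s):
--     ns = list(s)
--     l = len(ns)
--
--     lc = rc = 0
--     for e in s:
--         if e == '(':
--             lc += 1
--         elif e == ')':
--             rc += 1
--
--     l_stack = 0
--
--     for i in range(l):
--         e = s[i]
--         if e == '(':
--             l_stack += 1
--         elif e == ')':
--             l_stack -= 1
--         elif lc < l // 2:
--             ns[i] = '('
--             l_stack += 1
--             lc += 1
--         else:
--             ns[i] = ')'
--             l_stack -= 1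
--             rc += 1
--         if i != l - 1 and l_stack <= 0:
--             return None
--
--     return ''.join(ns) if l_stack == 0 else None
-- ===== SOURCE B (Python) =====
-- def solve(s):
--     # Back-to-front fill keyed on the closing-paren deficit, then a
--     # non-short-circuit validation computing the minimum prefix balance.
--     l = len(s)
--     if l == 0:
--         return ''
--     need = l // 2 - s.count('(')
--     q = sum(1 for c in s if c not in '()')
--     close_left = q - need
--     rev = []
--     for c in reversed(s):
--         if c not in '()':
--             if close_left > 0:
--                 rev.append(')')
--                 close_left -= 1
--             else:
--                 rev.append('(')
--         else:
--             rev.append(c)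
--     cand = rev[::-1]
--     bal = 0
--     mn = None
--     for c in cand[:-1]:
--         bal += 1 if c == '(' else -1
--         mn = bal if mn is None else min(mn, bal)
--     total = bal + (1 if cand[-1] == '(' else -1)
--     if total == 0 and (mn is None or mn >= 1):
--         return ''.join(cand)
--     return None
-- ===== Notes on version B (the rewrite author's own statement) =====
-- stated objective: alternative
-- what changed: A fills and validates in one fused left-to-right loop with early exit; B instead fills the string back-to-front keyed on the closing-paren deficit (walking the reversed string, the first q-need fillable characters become closing parens, the remaining ones opening parens), then validates the completed candidate with a separate non-short-circuit fold computing the minimum prefix balance and the total balance.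
import Mathlib
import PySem

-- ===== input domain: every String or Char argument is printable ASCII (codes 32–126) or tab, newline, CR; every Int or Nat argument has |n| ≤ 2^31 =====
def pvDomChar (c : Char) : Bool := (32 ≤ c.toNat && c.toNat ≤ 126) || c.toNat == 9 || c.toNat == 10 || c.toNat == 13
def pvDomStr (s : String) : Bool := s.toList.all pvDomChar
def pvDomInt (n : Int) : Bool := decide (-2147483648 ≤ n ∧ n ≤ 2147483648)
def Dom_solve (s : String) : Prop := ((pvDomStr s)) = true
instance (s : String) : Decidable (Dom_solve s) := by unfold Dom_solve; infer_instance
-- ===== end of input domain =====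

-- B fills back-to-front keyed on the closing-paren deficit and validates via a
-- min-prefix-balance fold instead of A's fused fill-and-early-exit loop (alternative decomposition, same cost).

-- ===== PORT A =====
-- A's second loop: walks the remaining characters, rewriting fillable ones,
-- tracking lc and l_stack; early None when the stack is ≤ 0 before the last index.
def solveALoop (half lc lstack : Int) (acc : List Char) : List Char → Option (List Char)
  | [] => if lstack = 0 then some acc.reverse else none
  | c :: rest =>
    let st :=
      if c = '(' then (c, lc, lstack + 1)
      else if c = ')' then (c, lc, lstack - 1)
      else if lc < half then ('(', lc + 1, lstack + 1)
      else (')', lc, lstack - 1)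
    if rest ≠ [] ∧ st.2.2 ≤ 0 then none
    else solveALoop half st.2.1 st.2.2 (st.1 :: acc) rest

def solve (s : String) : Option String :=
  let ns := s.toList
  let l : Int := (ns.length : Int)
  -- first loop: count '(' and ')' (rc is computed by A but never used afterwards)
  let counts := ns.foldl (fun (p : Int × Int) e =>
      if e = '(' then (p.1 + 1, p.2)
      else if e = ')' then (p.1, p.2 + 1)
      else p) (0, 0)
  (solveALoop (PySem.Int.floordiv l 2) counts.1 0 [] ns).map (fun cs => String.ofList cs)

-- ===== PORT B =====
-- B's fill pass over the REVERSED string: the first `cl` fillable characters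
-- (seen from the right) become ')', the rest become '('.
def fillRev : Int → List Char → List Char
  | _, [] => []
  | cl, c :: rest =>
    if ¬(c = '(' ∨ c = ')') then
      if cl > 0 then ')' :: fillRev (cl - 1) rest
      else '(' :: fillRev cl rest
    else c :: fillRev cl rest

-- B's validation fold: running balance plus running minimum (None until first step).
def scanMin : Int × Option Int → List Char → Int × Option Int
  | st, [] => st
  | (bal, mn), c :: rest =>
    let bal' := bal + (if c = '(' then 1 else -1)
    let mn' : Option Int := match mn with
      | none => some bal'
      | some m => some (min m bal')
    scanMin (bal', mn') rest

def minOK : Option Int → Bool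
  | none => true
  | some m => decide (1 ≤ m)

def solve_alt (s : String) : Option String :=
  let cs := s.toList
  if cs = [] then some "" else
  let l : Int := (cs.length : Int)
  let need := PySem.Int.floordiv l 2 - (cs.count '(' : Int)
  let q : Int := (cs.countP (fun c => !(decide (c = '(' ∨ c = ')'))) : Int)
  let cand := (fillRev (q - need) cs.reverse).reverse
  let st := scanMin (0, none) cand.dropLast
  let total := st.1 + (if cand.getLastD ' ' = '(' then 1 else -1)
  if total = 0 ∧ minOK st.2 = true then some (String.ofList cand) else none

-- ===== PRECONDITION & SPEC =====
def Spec_solve (s : String) (out : Option String) : Prop := out = solve_alt s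
instance (s : String) (out : Option String) : Decidable (Spec_solve s out) := by unfold Spec_solve; infer_instance

-- ===== CLAIM (what is proved, stated in full; the proofs are below) =====
def Claim_equal_solve : Prop := ∀ (s : String), Dom_solve s → Spec_solve s (solve s)

-- ===== LEMMAS AND PROOFS =====

-- Proof-side intermediate: left-to-right fill (first `need` fillables become '(')
-- and early-exit validation, the common normal form of both programs.
def fillB : Int → List Char → List Char
  | _, [] => []
  | need, c :: rest =>
    if c = '(' ∨ c = ')' then c :: fillB need rest
    else if need > 0 then '(' :: fillB (need - 1) rest
    else ')' :: fillB need rest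

def checkB (bal : Int) : List Char → Bool
  | [] => bal = 0
  | c :: rest =>
    let bal' := bal + (if c = '(' then 1 else -1)
    if rest ≠ [] ∧ bal' ≤ 0 then false else checkB bal' rest

-- A's counting loop computes List.count '(' in its first component.
theorem countsA_fst (cs : List Char) (a b : Int) :
    (cs.foldl (fun (p : Int × Int) e =>
      if e = '(' then (p.1 + 1, p.2)
      else if e = ')' then (p.1, p.2 + 1)
      else p) (a, b)).1 = a + (cs.count '(' : Int) := by
  induction cs generalizing a b with
  | nil => simp
  | cons c rest ih =>
    by_cases h1 : c = '('
    · simp [h1, ih]; ring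
    · by_cases h2 : c = ')' <;>
        simp [h1, h2, List.foldl_cons, ih]

theorem fillB_ne_nil (need : Int) (c : Char) (rest : List Char) :
    fillB need (c :: rest) ≠ [] := by
  unfold fillB; split_ifs <;> simp

theorem fillB_eq_nil_iff (need : Int) (cs : List Char) :
    (fillB need cs = []) ↔ cs = [] := by
  cases cs with
  | nil => simp [fillB]
  | cons c rest => simp [fillB_ne_nil]

theorem checkB_cons (bal : Int) (c : Char) (rest : List Char) :
    checkB bal (c :: rest) =
      if rest ≠ [] ∧ bal + (if c = '(' then 1 else -1) ≤ 0 then false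
      else checkB (bal + (if c = '(' then 1 else -1)) rest := rfl

theorem checkB_cons_ne (bal : Int) (c : Char) (rest : List Char) (h : rest ≠ []) :
    checkB bal (c :: rest) =
      if bal + (if c = '(' then 1 else -1) ≤ 0 then false
      else checkB (bal + (if c = '(' then 1 else -1)) rest := by
  rw [checkB_cons]; simp [h]

-- The core invariant: A's fused loop equals fill-then-check with matching state.
theorem loop_eq (cs : List Char) (half lc lstack : Int) (acc : List Char) :
    solveALoop half lc lstack acc cs =
      (if checkB lstack (fillB (half - lc) cs) then
        some (acc.reverse ++ fillB (half - lc) cs) else none) := by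
  induction cs generalizing lc lstack acc with
  | nil => simp [solveALoop, fillB, checkB]
  | cons c rest ih =>
    by_cases hr : rest = []
    · subst hr
      simp [solveALoop, fillB]
      split_ifs <;> simp_all [checkB] <;> omega
    · have hfill : fillB (half - lc) rest ≠ [] := by
        simpa [fillB_eq_nil_iff] using hr
      have hfill1 : fillB (half - lc - 1) rest ≠ [] := by
        simpa [fillB_eq_nil_iff] using hr
      by_cases h1 : c = '('
      · subst h1
        simp only [solveALoop]
        rw [ih]
        simp [fillB, hr, checkB_cons_ne _ _ _ hfill]
        split_ifs <;> first | rfl | omega | simp_all [sub_eq_add_neg]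
      · by_cases h2 : c = ')'
        · subst h2
          simp only [solveALoop]
          rw [ih]
          simp [fillB, h1, hr, checkB_cons_ne _ _ _ hfill]
          split_ifs <;> first | rfl | omega | simp_all [sub_eq_add_neg]
        · by_cases h3 : lc < half
          · have hneed : half - lc > 0 := by omega
            have hstep : half - (lc + 1) = half - lc - 1 := by ring
            simp only [solveALoop]
            rw [ih]
            simp [fillB, h1, h2, h3, hstep, hr, checkB_cons_ne _ _ _ hfill1]
            split_ifs <;> first | rfl | omega | simp_all [sub_eq_add_neg]
          · have hneed : ¬ half - lc > 0 := by omega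
            simp only [solveALoop]
            rw [ih]
            simp [fillB, h1, h2, h3, hr, checkB_cons_ne _ _ _ hfill]
            split_ifs <;> first | rfl | omega | simp_all [sub_eq_add_neg]

-- fillB with a nonpositive need does not depend on the exact need.
theorem fillB_nonpos (n m : Int) (cs : List Char) (hn : n ≤ 0) (hm : m ≤ 0) :
    fillB n cs = fillB m cs := by
  induction cs with
  | nil => rfl
  | cons c rest ih =>
    unfold fillB
    split_ifs <;> simp_all <;> omega

def cntF (cs : List Char) : Nat := cs.countP (fun c => !(decide (c = '(' ∨ c = ')')))

def remF : Int → List Char → Int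
  | cl, [] => cl
  | cl, c :: rest =>
    remF (if ¬(c = '(' ∨ c = ')') ∧ cl > 0 then cl - 1 else cl) rest

theorem fillPred_true (c : Char) (h : ¬(c = '(' ∨ c = ')')) :
    (!(decide (c = '(' ∨ c = ')'))) = true := by simp [h]

theorem fillRev_keep (cl : Int) (c : Char) (rest : List Char) (h : c = '(' ∨ c = ')') :
    fillRev cl (c :: rest) = c :: fillRev cl rest := by
  rw [fillRev.eq_def]
  show (if ¬(c = '(' ∨ c = ')') then
      if cl > 0 then ')' :: fillRev (cl - 1) rest else '(' :: fillRev cl rest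
    else c :: fillRev cl rest) = c :: fillRev cl rest
  rw [if_neg (not_not_intro h)]

theorem fillRev_close (cl : Int) (c : Char) (rest : List Char)
    (h : ¬(c = '(' ∨ c = ')')) (hcl : cl > 0) :
    fillRev cl (c :: rest) = ')' :: fillRev (cl - 1) rest := by
  rw [fillRev.eq_def]
  show (if ¬(c = '(' ∨ c = ')') then
      if cl > 0 then ')' :: fillRev (cl - 1) rest else '(' :: fillRev cl rest
    else c :: fillRev cl rest) = ')' :: fillRev (cl - 1) rest
  rw [if_pos h, if_pos hcl]

theorem fillRev_open (cl : Int) (c : Char) (rest : List Char)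
    (h : ¬(c = '(' ∨ c = ')')) (hcl : ¬ cl > 0) :
    fillRev cl (c :: rest) = '(' :: fillRev cl rest := by
  rw [fillRev.eq_def]
  show (if ¬(c = '(' ∨ c = ')') then
      if cl > 0 then ')' :: fillRev (cl - 1) rest else '(' :: fillRev cl rest
    else c :: fillRev cl rest) = '(' :: fillRev cl rest
  rw [if_pos h, if_neg hcl]

theorem remF_pos_iff (cs : List Char) (cl : Int) :
    remF cl cs > 0 ↔ (cntF cs : Int) < cl := by
  induction cs generalizing cl with
  | nil => simp [remF, cntF]
  | cons c rest ih =>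
    by_cases h : c = '(' ∨ c = ')'
    · rw [show remF cl (c :: rest) = remF cl rest by simp [remF, h]]
      rw [ih]
      simp only [cntF, List.countP_cons]
      rcases h with h | h <;> simp [h]
    · by_cases hcl : cl > 0
      · rw [show remF cl (c :: rest) = remF (cl - 1) rest by simp [remF, h, hcl]]
        rw [ih]
        simp only [cntF, List.countP_cons, fillPred_true c h]
        push_cast
        omega
      · rw [show remF cl (c :: rest) = remF cl rest by simp [remF, h, hcl]]
        rw [ih]
        simp only [cntF, List.countP_cons, fillPred_true c h]
        push_cast
        omega

theorem fillRev_append (cl : Int) (xs ys : List Char) :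
    fillRev cl (xs ++ ys) = fillRev cl xs ++ fillRev (remF cl xs) ys := by
  induction xs generalizing cl with
  | nil => simp [fillRev, remF]
  | cons c rest ih =>
    by_cases h : c = '(' ∨ c = ')'
    · simp [fillRev, h, remF, ih]
    · by_cases hcl : cl > 0 <;> simp [fillRev, h, hcl, remF, ih]

-- The back-to-front fill equals the left-to-right fill with the complementary count.
theorem fillRev_eq_fillB (cs : List Char) (cl : Int) :
    fillRev cl cs.reverse = (fillB ((cntF cs : Int) - cl) cs).reverse := by
  induction cs generalizing cl with
  | nil => simp [fillRev, fillB]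
  | cons c rest ih =>
    rw [List.reverse_cons, fillRev_append]
    by_cases h : c = '(' ∨ c = ')'
    · have hc : cntF (c :: rest) = cntF rest := by
        rcases h with h | h <;> simp [cntF, List.countP_cons, h]
      simp only [fillB, if_pos h, List.reverse_cons, hc]
      rw [ih]
      congr 1
      rw [fillRev_keep _ _ _ h]
      rfl
    · have hc : (cntF (c :: rest) : Int) = (cntF rest : Int) + 1 := by
        simp [cntF, List.countP_cons, (not_or.mp h).1, (not_or.mp h).2]
      have hrem := remF_pos_iff rest.reverse cl
      have hcrev : cntF rest.reverse = cntF rest := by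
        simp [cntF, List.countP_reverse]
      by_cases hgt : (cntF rest : Int) < cl
      · -- last fillable becomes ')'; need' = cnt rest + 1 - cl ≤ 0
        have hpos : remF cl rest.reverse > 0 := by rw [hrem, hcrev]; exact hgt
        have hneed : ¬ ((cntF (c :: rest) : Int) - cl > 0) := by omega
        simp only [fillB, if_neg h, if_neg hneed, List.reverse_cons]
        rw [ih]
        have : fillB ((cntF rest : Int) - cl) rest = fillB ((cntF (c :: rest) : Int) - cl) rest :=
          fillB_nonpos _ _ _ (by omega) (by omega)
        rw [this]
        rw [fillRev_close _ _ _ h hpos]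
        rfl
      · have hpos : ¬ remF cl rest.reverse > 0 := by rw [hrem, hcrev]; exact hgt
        have hneed : (cntF (c :: rest) : Int) - cl > 0 := by omega
        have hstep : (cntF (c :: rest) : Int) - cl - 1 = (cntF rest : Int) - cl := by omega
        simp only [fillB, if_neg h, if_pos hneed, List.reverse_cons, hstep]
        rw [ih]
        rw [fillRev_open _ _ _ h hpos]
        rfl

-- scanMin with an accumulated minimum, in terms of scanMin started from none.
theorem scanMin_some (ys : List Char) (b m : Int) :
    scanMin (b, some m) ys =
      ((scanMin (b, none) ys).1,
        some (match (scanMin (b, none) ys).2 with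
          | none => m
          | some v => min m v)) := by
  induction ys generalizing b m with
  | nil => simp [scanMin]
  | cons c rest ih =>
    simp only [scanMin]
    rw [ih, ih (b + (if c = '(' then 1 else -1))]
    rcases h : (scanMin (b + (if c = '(' then 1 else -1), none) rest).2 with _ | v
    · simp [h]
    · simp [h, min_assoc]

-- Early-exit validation of ys ++ [c] equals the min-prefix-balance test over ys
-- plus the total-balance test.
theorem checkB_eq_scan (ys : List Char) (bal : Int) (c : Char) :
    checkB bal (ys ++ [c]) =
      (minOK (scanMin (bal, none) ys).2 &&
        decide ((scanMin (bal, none) ys).1 + (if c = '(' then 1 else -1) = 0)) := by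
  induction ys generalizing bal with
  | nil => simp [checkB, scanMin, minOK]
  | cons y rest ih =>
    have hne : rest ++ [c] ≠ [] := by simp
    rw [List.cons_append, checkB_cons_ne _ _ _ hne, ih]
    simp only [scanMin]
    simp only [scanMin_some]
    generalize (bal + (if y = '(' then 1 else -1)) = b'
    rcases h2 : (scanMin (b', none) rest).2 with _ | v
    · by_cases hb : b' ≤ 0
      · have h1 : ¬ ((1:Int) ≤ b') := by omega
        simp [h2, hb, minOK, h1]
      · have h1 : (1:Int) ≤ b' := by omega
        simp [h2, hb, minOK, h1]
    · by_cases hb : b' ≤ 0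
      · have h1 : ¬ ((1:Int) ≤ min b' v) := by
          have := min_le_left b' v
          omega
        simp [h2, hb, minOK, h1]
      · have h1 : (1:Int) ≤ b' := by omega
        simp [h2, hb, minOK, le_min_iff, h1]

-- The candidate built by B equals the candidate built by A.
theorem cand_eq (cs : List Char) (need : Int) :
    (fillRev ((cntF cs : Int) - need) cs.reverse).reverse = fillB need cs := by
  rw [fillRev_eq_fillB, List.reverse_reverse]
  congr 1
  omega

-- ===== VERDICT (by name: the statement is the Claim_ definition above) =====
theorem solve_spec : Claim_equal_solve := by
  intro s _
  unfold Spec_solve solve solve_alt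
  rcases hcs : s.toList with _ | ⟨c, rest⟩
  · simp [hcs, solveALoop, PySem.Int.floordiv]
  · simp only [hcs]
    rw [countsA_fst, loop_eq]
    simp only [List.length_cons, Nat.cast_add, Nat.cast_one, zero_add,
      List.cons_ne_nil, if_neg (by simp : ¬ (c :: rest = []))]
    rw [show ((c :: rest).countP (fun c => !(decide (c = '(' ∨ c = ')'))) : Int)
        = (cntF (c :: rest) : Int) from rfl]
    rw [cand_eq]
    set need := PySem.Int.floordiv ((rest.length : Int) + 1) 2 - ((c :: rest).count '(' : Int)
      with hneed
    have hne : fillB need (c :: rest) ≠ [] := fillB_ne_nil _ _ _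
    set cand := fillB need (c :: rest) with hcanddef
    have hsplit : cand.dropLast ++ [cand.getLast hne] = cand := List.dropLast_append_getLast hne
    have hlastd : cand.getLastD ' ' = cand.getLast hne := by
      rw [List.getLastD_eq_getLast?, List.getLast?_eq_getLast_of_ne_nil hne]
      rfl
    rw [← hsplit, checkB_eq_scan, hsplit, hlastd]
    rcases hok : minOK (scanMin (0, none) cand.dropLast).2 with _ | _
    · simp [hok]
    · by_cases ht : (scanMin (0, none) cand.dropLast).1 +
        (if cand.getLast hne = '(' then 1 else -1) = 0 <;> simp [hok, ht]
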